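-- pv_equiv track=rewrite | github.com/ophintor/AoC2020 | day16/part2.py | find_fields_order
-- ===== SOURCE A (Python) =====
-- def are_fields_unique(fields):
--     unique = True
--
--     for position in fields.keys():
--         if len(fields[position]) > 1:
--             unique = False
--             break
--
--     return unique
--
-- def find_fields_order(tickets, valid_values):
--     fields = {}
--
--     for position in range(0, len(valid_values)):
--         fields[position] = []
--         values = []
--
--         for ticket in tickets:
--             values.append(ticket.split(',')[position])
--
--         for field in valid_values.keys():
--             found = True
--             for value in values:
--                 if int(value) not in valid_values[field]:
--                     found = False
--                     break
--             if found:
--                 fields[position].append(field)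
--
--     while (not are_fields_unique(fields)):
--         for position in fields.keys():
--             if len(fields[position]) == 1:
--                 field_to_delete = fields[position][0]
--
--                 for position in fields.keys():
--                     if len(fields[position]) > 1 and field_to_delete in fields[position]:
--                         fields[position].remove(field_to_delete)
--
--     return fields
-- ===== SOURCE B (Python) =====
-- def find_fields_order(tickets, valid_values):
--     n = len(valid_values)
--     names = list(valid_values.keys())
--     valsets = {f: set(valid_values[f]) for f in names}
--     rows = [[int(v) for v in t.split(',')[:n]] for t in tickets]
--     fields = {p: [f for f in names
--                   if all(row[p] in valsets[f] for row in rows)]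
--               for p in range(n)}
--     # worklist elimination instead of A's repeated full passes
--     queue = [p for p in range(n) if len(fields[p]) == 1]
--     i = 0
--     while i < len(queue):
--         f = fields[queue[i]][0]
--         i += 1
--         for q in range(n):
--             if len(fields[q]) > 1 and f in fields[q]:
--                 fields[q].remove(f)
--                 if len(fields[q]) == 1:
--                     queue.append(q)
--     return fields
-- ===== Notes on version B (the rewrite author's own statement) =====
-- stated objective: faster
-- what changed: B parses each ticket once into integer columns and tests membership against per-field value sets (A re-splits every ticket and re-parses every value for every position and scans value lists), and replaces A's repeated full elimination passes over all positions with a worklist seeded with the singleton positions; equivalence is proved on all inputs where the candidate sets are solvable by successive elimination (exactly where A's while-loop terminates deterministically).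
-- outside the precondition, e.g. on find_fields_order(['1', 'x'], {'f': [2]}): A returns {0: []}, B raises ValueError
import Mathlib
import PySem

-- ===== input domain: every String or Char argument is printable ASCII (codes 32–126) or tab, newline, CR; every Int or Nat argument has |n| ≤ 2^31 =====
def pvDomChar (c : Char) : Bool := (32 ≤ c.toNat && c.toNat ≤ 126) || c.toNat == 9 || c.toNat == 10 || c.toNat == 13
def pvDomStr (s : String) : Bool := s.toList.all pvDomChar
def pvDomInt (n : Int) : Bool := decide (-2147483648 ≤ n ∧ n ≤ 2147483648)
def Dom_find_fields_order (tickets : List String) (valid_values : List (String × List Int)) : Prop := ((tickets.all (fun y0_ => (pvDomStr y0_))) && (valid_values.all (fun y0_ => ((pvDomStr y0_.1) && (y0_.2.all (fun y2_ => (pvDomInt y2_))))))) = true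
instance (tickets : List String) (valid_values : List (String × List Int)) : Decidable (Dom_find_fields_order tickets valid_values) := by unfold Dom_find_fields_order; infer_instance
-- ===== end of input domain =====

-- B restructures A: it parses each ticket once (instead of re-splitting per position), tests values
-- against sets, and replaces A's repeated full elimination passes by a worklist seeded with the
-- singleton positions; objective: faster (see claim).

-- shared helper: ticket.split(',')  (sep is non-empty, so split? is always `some`)
def pvSplit (t : String) : List String := (PySem.Str.split? t ",").getD []

-- ===== PORT A =====
def pvAreFieldsUnique (fields : PySem.Dict Int (List String)) : Bool :=
  -- `unique = True; for …: if len > 1: unique = False; break` ≡ all values have len ≤ 1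
  fields.keys.all (fun position => !(decide ((fields.getD position []).length > 1)))

-- one iteration of A's `while` body (the full double pass over fields.keys())
def pvPassA (fields : PySem.Dict Int (List String)) : PySem.Dict Int (List String) :=
  fields.keys.foldl (fun fs position =>
    if (fs.getD position []).length = 1 then
      let field_to_delete := (fs.getD position []).getD 0 ""
      fields.keys.foldl (fun fs position2 =>
        if (fs.getD position2 []).length > 1 ∧ field_to_delete ∈ fs.getD position2 [] then
          fs.modify position2 [] (fun l => (PySem.List.remove? l field_to_delete).getD l)
        else fs) fs
    else fs) fields

-- A's `while (not are_fields_unique(fields))`; fuel: in any terminating Python run every pass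
-- but the last removes at least one candidate, so (total candidates + 1) passes suffice
def pvWhileA : Nat → PySem.Dict Int (List String) → PySem.Dict Int (List String)
  | 0, fields => fields
  | fuel + 1, fields =>
    if pvAreFieldsUnique fields then fields else pvWhileA fuel (pvPassA fields)

def find_fields_order (tickets : List String) (valid_values : List (String × List Int)) : List (Int × List String) :=
  let vv := PySem.Dict.ofList valid_values
  let fields : PySem.Dict Int (List String) :=
    (PySem.List.pyRange 0 (PySem.Dict.size vv : Nat)).foldl (fun fields position =>
      let fields := fields.insert position []
      let values : List String := tickets.foldl (fun values ticket =>
        values ++ [PySem.List.pyGetD (pvSplit ticket) position ""]) []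
      vv.keys.foldl (fun fields field =>
        let found := values.all (fun value =>
          decide ((PySem.Int.ofStr? value).getD 0 ∈ vv.getD field []))
        if found then fields.modify position [] (fun l => l ++ [field]) else fields)
        fields) PySem.Dict.empty
  (pvWhileA ((fields.values.map List.length).sum + 1) fields).items

-- ===== PORT B =====
-- the worklist loop of Source B: pop a singleton position's field, delete it from every larger
-- candidate list, enqueue positions that drop to exactly one candidate; each position enters
-- the queue at most once (a singleton list is never modified again), so n+1 steps of fuel suffice
def pvWorklist : Nat → Int → PySem.Dict Int (List String) → List Int → PySem.Dict Int (List String)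
  | 0, _, fields, _ => fields
  | _ + 1, _, fields, [] => fields
  | fuel + 1, n, fields, q :: rest =>
    let f := (fields.getD q []).getD 0 ""
    let st := (PySem.List.pyRange 0 n).foldl
      (fun (st : PySem.Dict Int (List String) × List Int) r =>
        if (st.1.getD r []).length > 1 ∧ f ∈ st.1.getD r [] then
          let fields' := st.1.modify r [] (fun l => (PySem.List.remove? l f).getD l)
          if (fields'.getD r []).length = 1 then (fields', st.2 ++ [r]) else (fields', st.2)
        else st) (fields, rest)
    pvWorklist fuel n st.1 st.2

def find_fields_order_alt (tickets : List String) (valid_values : List (String × List Int)) : List (Int × List String) :=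
  let vv := PySem.Dict.ofList valid_values
  let n : Int := (PySem.Dict.size vv : Nat)
  let names := vv.keys
  let valsets : PySem.Dict String (PySem.Set Int) :=
    names.foldl (fun d f => d.insert f (PySem.Set.ofList (vv.getD f []))) PySem.Dict.empty
  let rows : List (List Int) := tickets.map (fun t =>
    (PySem.List.slice (pvSplit t) none (some n)).map (fun v => (PySem.Int.ofStr? v).getD 0))
  let fields : PySem.Dict Int (List String) :=
    (PySem.List.pyRange 0 n).foldl (fun d p =>
      d.insert p (names.filter (fun f =>
        rows.all (fun row => PySem.Set.contains (valsets.getD f []) (PySem.List.pyGetD row p 0))))) PySem.Dict.empty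
  let queue := (PySem.List.pyRange 0 n).filter (fun p => (fields.getD p []).length = 1)
  (pvWorklist (n.toNat + 1) n fields queue).items

-- ===== PRECONDITION & SPEC =====
-- int(ticket.split(',')[p]) as an Option: none exactly where Python raises IndexError/ValueError
def pvColVal (t : String) (p : Int) : Option Int :=
  (PySem.List.pyGet? (pvSplit t) p).bind PySem.Int.ofStr?

-- declarative phase-1 candidates: the fields accepting every ticket's value at position p
def pvCand (tickets : List String) (vv : PySem.Dict String (List Int)) (p : Int) : List String :=
  vv.keys.filter (fun f => tickets.all (fun t => decide ((pvColVal t p).getD 0 ∈ vv.getD f [])))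

-- `cascadeOk cand order used = true` says: visiting the positions in `order`, each position's
-- candidate list minus the fields already forced leaves exactly one field (which is then forced).
def cascadeOk (cand : Int → List String) : List Int → List String → Bool
  | [], _ => true
  | p :: rest, used =>
    let rem := (cand p).filter (fun g => decide (g ∉ used))
    decide (rem.length = 1) && cascadeOk cand rest (used ++ [rem.getD 0 ""])

-- Pre_ excludes (a) inputs where A raises (a ticket with fewer columns than fields: IndexError;
-- a used column value that int() rejects and that A reaches before an early membership break:
-- ValueError), together with all inputs whose used column values do not all parse, and (b) inputs
-- whose candidate sets are NOT solvable by successive elimination of forced fields: on those A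
-- either loops forever (stuck elimination) or — when no consistent assignment exists at all —
-- returns a value that depends on its accidental scan order, which is anybody's choice of corner.
def Pre_find_fields_order (tickets : List String) (valid_values : List (String × List Int)) : Prop :=
  (∀ p ∈ PySem.List.pyRange 0 (PySem.Dict.size (PySem.Dict.ofList valid_values) : Nat),
      ∀ t ∈ tickets, (pvColVal t p).isSome) ∧
  ∃ l ∈ (PySem.List.pyRange 0 (PySem.Dict.size (PySem.Dict.ofList valid_values) : Nat)).permutations,
      cascadeOk (pvCand tickets (PySem.Dict.ofList valid_values)) l [] = true
instance (tickets : List String) (valid_values : List (String × List Int)) : Decidable (Pre_find_fields_order tickets valid_values) := by unfold Pre_find_fields_order; infer_instance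

def pvWitness_find_fields_order : List String × (List (String × List Int)) :=
  (["1,2"], [("a", [1, 2]), ("b", [2])])

def Spec_find_fields_order (tickets : List String) (valid_values : List (String × List Int)) (out : List (Int × List String)) : Prop := out = find_fields_order_alt tickets valid_values
instance (tickets : List String) (valid_values : List (String × List Int)) (out : List (Int × List String)) : Decidable (Spec_find_fields_order tickets valid_values out) := by unfold Spec_find_fields_order; infer_instance

-- ===== CLAIM (what is proved, stated in full; the proofs are below) =====
def Claim_equal_find_fields_order : Prop := ∀ (tickets : List String) (valid_values : List (String × List Int)), Dom_find_fields_order tickets valid_values → Pre_find_fields_order tickets valid_values → Spec_find_fields_order tickets valid_values (find_fields_order tickets valid_values)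

-- ===== LEMMAS AND PROOFS =====

-- ---------- generic fold lemmas ----------
lemma pv_foldl_pres {σ α : Type} (P : σ → Prop) (step : σ → α → σ) (L : List α)
    (h : ∀ s x, x ∈ L → P s → P (step s x)) : ∀ s, P s → P (L.foldl step s) := by
  induction L with
  | nil => intro s hs; exact hs
  | cons x L ih =>
    intro s hs
    exact ih (fun s y hy => h s y (List.mem_cons_of_mem x hy)) _ (h s x List.mem_cons_self hs)

lemma pv_foldl_rel {σ τ α : Type} (R : σ → τ → Prop) (f : σ → α → σ) (g : τ → α → τ)
    (L : List α) (h : ∀ s t x, x ∈ L → R s t → R (f s x) (g t x)) :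
    ∀ s t, R s t → R (L.foldl f s) (L.foldl g t) := by
  induction L with
  | nil => intro s t hst; exact hst
  | cons x L ih =>
    intro s t hst
    exact ih (fun s t y hy => h s t y (List.mem_cons_of_mem x hy)) _ _ (h s t x List.mem_cons_self hst)

lemma pv_foldl_lazy {σ α : Type} (μ : σ → Nat) (step : σ → α → σ) (L : List α)
    (h : ∀ s x, x ∈ L → step s x = s ∨ μ (step s x) < μ s) :
    ∀ s, L.foldl step s = s ∨ μ (L.foldl step s) < μ s := by
  induction L with
  | nil => intro s; exact Or.inl rfl
  | cons x L ih =>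
    intro s
    rcases h s x List.mem_cons_self with h1 | h1
    · rw [List.foldl_cons, h1]; exact ih (fun s y hy => h s y (List.mem_cons_of_mem x hy)) s
    · rcases ih (fun s y hy => h s y (List.mem_cons_of_mem x hy)) (step s x) with h2 | h2
      · right; rw [List.foldl_cons, h2]; exact h1
      · right; rw [List.foldl_cons]; exact lt_trans h2 h1

lemma pv_foldl_lazy_le {σ α : Type} (μ : σ → Nat) (step : σ → α → σ) (L : List α)
    (h : ∀ s x, x ∈ L → step s x = s ∨ μ (step s x) < μ s) (s : σ) :
    μ (L.foldl step s) ≤ μ s := by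
  rcases pv_foldl_lazy μ step L h s with h1 | h1
  · rw [h1]
  · exact le_of_lt h1

-- a fold whose steps change only their own position keeps every other position
lemma pv_foldl_eval_of_not_mem {α : Type} (step : (Int → α) → Int → (Int → α)) (L : List Int)
    (h : ∀ s x r, x ∈ L → r ≠ x → step s x r = s r) (q : Int) (hq : q ∉ L) :
    ∀ s, (L.foldl step s) q = s q := by
  induction L with
  | nil => intro s; rfl
  | cons x L ih =>
    intro s
    rw [List.foldl_cons,
      ih (fun s y r hy => h s y r (List.mem_cons_of_mem x hy)) (fun hm => hq (List.mem_cons_of_mem x hm))]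
    exact h s x q List.mem_cons_self (fun e => hq (e ▸ List.mem_cons_self))

-- ---------- small list facts ----------
lemma pv_len_one_of_mem {α : Type} {xs : List α} {f : α} (h : xs.length = 1) (hm : f ∈ xs) :
    xs = [f] := by
  match xs, h with
  | [a], _ => simp_all

lemma pv_len_one_getD {α : Type} [Inhabited α] {xs : List α} (h : xs.length = 1) (d : α) :
    xs = [xs.getD 0 d] := by
  match xs, h with
  | [a], _ => rfl

lemma pv_exists_ne_of_one_lt {α : Type} {xs : List α} (h : 1 < xs.length)
    (hnd : xs.Nodup) (f : α) : ∃ g ∈ xs, g ≠ f := by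
  match xs, h with
  | a :: b :: t, _ =>
    simp only [List.nodup_cons, List.mem_cons] at hnd
    by_cases ha : a = f
    · exact ⟨b, by simp, fun e => hnd.1 (Or.inl (by rw [ha, e]))⟩
    · exact ⟨a, by simp, ha⟩

lemma pv_len_le_sum (L : List Int) (g : Int → Nat) (h1 : ∀ x ∈ L, 1 ≤ g x) :
    L.length ≤ (L.map g).sum := by
  induction L with
  | nil => simp
  | cons y L ih2 =>
    simp only [List.map_cons, List.sum_cons, List.length_cons]
    have := h1 y List.mem_cons_self
    have := ih2 (fun z hz => h1 z (List.mem_cons_of_mem y hz))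
    omega

lemma pv_all_len_one (L : List Int) (g : Int → Nat) (h1 : ∀ x ∈ L, 1 ≤ g x)
    (h2 : (L.map g).sum ≤ L.length) : ∀ x ∈ L, g x = 1 := by
  induction L with
  | nil => simp
  | cons x L ih =>
    simp only [List.map_cons, List.sum_cons, List.length_cons] at h2
    have hx := h1 x List.mem_cons_self
    have hrest : ∀ y ∈ L, 1 ≤ g y := fun y hy => h1 y (List.mem_cons_of_mem x hy)
    have hsum := pv_len_le_sum L g hrest
    intro z hz
    rcases List.mem_cons.mp hz with rfl | hz
    · omega
    · exact ih hrest (by omega) z hz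

lemma pv_filter_disjoint_length (L : List Int) (p q : Int → Bool)
    (h : ∀ x, ¬(p x = true ∧ q x = true)) :
    (L.filter p).length + (L.filter q).length ≤ L.length := by
  induction L with
  | nil => simp
  | cons x L ih =>
    by_cases hp : p x = true
    · by_cases hq : q x = true
      · exact absurd ⟨hp, hq⟩ (h x)
      · simp [hp, hq]; omega
    · by_cases hq : q x = true <;> simp [hp, hq] <;> omega

lemma pv_filter_partition_length (L : List Int) (b c : Int → Bool)
    (h : ∀ x ∈ L, c x = true → b x = true) :
    (L.filter (fun x => b x && !c x)).length + (L.filter c).length = (L.filter b).length := by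
  induction L with
  | nil => simp
  | cons x L ih =>
    have ih' := ih (fun y hy => h y (List.mem_cons_of_mem x hy))
    by_cases hc : c x
    · have hb := h x List.mem_cons_self hc
      simp [hc, hb]
      omega
    · by_cases hb : b x <;> simp [hc, hb, ih']
      omega

lemma pv_pairs_inj {α β : Type} (xs : List (α × β)) (h : (xs.map Prod.snd).Nodup) :
    ∀ {p q : α × β}, p ∈ xs → q ∈ xs → p.2 = q.2 → p = q := by
  induction xs with
  | nil => intro p q hp; simp at hp
  | cons x xs ih =>
    simp only [List.map_cons, List.nodup_cons] at h
    intro p q hp hq he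
    rcases List.mem_cons.mp hp with hp1 | hp1
    · rcases List.mem_cons.mp hq with hq1 | hq1
      · rw [hp1, hq1]
      · refine absurd ?_ h.1
        have h2 : q.2 ∈ xs.map Prod.snd := List.mem_map_of_mem hq1
        rwa [← he, hp1] at h2
    · rcases List.mem_cons.mp hq with hq1 | hq1
      · refine absurd ?_ h.1
        have h2 : p.2 ∈ xs.map Prod.snd := List.mem_map_of_mem hp1
        rwa [he, hq1] at h2
      · exact ih h.2 hp1 hq1 he

-- (remove? l v).getD l is Python's list.remove for the guarded use: erase of the first occurrence
lemma pv_removeD_eq_erase {l : List String} {v : String} :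
    (PySem.List.remove? l v).getD l = l.erase v := by
  by_cases h : v ∈ l
  · rw [PySem.List.remove?_eq_some_erase l v h]; rfl
  · rw [(PySem.List.remove?_eq_none_iff l v).mpr h, List.erase_of_not_mem h]; rfl

-- ---------- the elimination order and its forced assignment ----------
def elimForced (cand : Int → List String) (u : List String) (p : Int) : String :=
  ((cand p).filter (fun g => decide (g ∉ u))).getD 0 ""

def elimAssign (cand : Int → List String) : List Int → List String → List (Int × String)
  | [], _ => []
  | p :: rest, used =>
    let f := ((cand p).filter (fun g => decide (g ∉ used))).getD 0 ""
    (p, f) :: elimAssign cand rest (used ++ [f])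

lemma cascadeOk_cons (cand : Int → List String) (p : Int) (rest : List Int) (u : List String) :
    cascadeOk cand (p :: rest) u
      = (decide (((cand p).filter (fun g => decide (g ∉ u))).length = 1)
          && cascadeOk cand rest (u ++ [elimForced cand u p])) := rfl

lemma elimAssign_cons (cand : Int → List String) (p : Int) (rest : List Int) (u : List String) :
    elimAssign cand (p :: rest) u
      = (p, elimForced cand u p) :: elimAssign cand rest (u ++ [elimForced cand u p]) := rfl

lemma elim_fst (cand : Int → List String) :
    ∀ (l : List Int) (u : List String), (elimAssign cand l u).map Prod.fst = l := by
  intro l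
  induction l with
  | nil => intro u; rfl
  | cons p rest ih => intro u; simp [elimAssign, ih]

lemma elim_mem (cand : Int → List String) :
    ∀ (l : List Int) (u : List String), cascadeOk cand l u = true →
      ∀ pf ∈ elimAssign cand l u, pf.2 ∈ cand pf.1 ∧ pf.2 ∉ u := by
  intro l
  induction l with
  | nil => intro u _ pf hpf; simp [elimAssign] at hpf
  | cons p rest ih =>
    intro u hca pf hpf
    rw [cascadeOk_cons, Bool.and_eq_true, decide_eq_true_eq] at hca
    obtain ⟨hlen, hrest⟩ := hca
    rw [elimAssign_cons] at hpf
    rcases List.mem_cons.mp hpf with h1 | hpf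
    · have hm : elimForced cand u p ∈ (cand p).filter (fun g => decide (g ∉ u)) := by
        rw [pv_len_one_getD hlen ""]
        exact List.mem_singleton.mpr rfl
      have := List.mem_filter.mp hm
      rw [h1]
      exact ⟨this.1, by simpa using this.2⟩
    · have := ih (u ++ [elimForced cand u p]) hrest pf hpf
      exact ⟨this.1, fun hm => this.2 (List.mem_append_left _ hm)⟩

lemma elim_snd_nodup (cand : Int → List String) :
    ∀ (l : List Int) (u : List String), cascadeOk cand l u = true →
      ((elimAssign cand l u).map Prod.snd).Nodup := by
  intro l
  induction l with
  | nil => intro u _; simp [elimAssign]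
  | cons p rest ih =>
    intro u hca
    rw [cascadeOk_cons, Bool.and_eq_true, decide_eq_true_eq] at hca
    obtain ⟨hlen, hrest⟩ := hca
    rw [elimAssign_cons, List.map_cons, List.nodup_cons]
    constructor
    · intro hm
      obtain ⟨pf, hpf, he⟩ := List.mem_map.mp hm
      refine (elim_mem cand rest (u ++ [elimForced cand u p]) hrest pf hpf).2 ?_
      rw [he]
      exact List.mem_append_right _ (List.mem_singleton.mpr rfl)
    · exact ih _ hrest

lemma elim_inj (cand : Int → List String) (l : List Int)
    (hca : cascadeOk cand l [] = true) {p q : Int × String}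
    (hp : p ∈ elimAssign cand l []) (hq : q ∈ elimAssign cand l [])
    (hne : p.1 ≠ q.1) : p.2 ≠ q.2 := by
  intro he
  exact hne (congrArg Prod.fst (pv_pairs_inj _ (elim_snd_nodup cand l [] hca) hp hq he))

lemma elim_cover (cand : Int → List String) (l : List Int) {p : Int} (hp : p ∈ l) :
    ∃ pf ∈ elimAssign cand l [], pf.1 = p := by
  have : p ∈ (elimAssign cand l []).map Prod.fst := by rw [elim_fst]; exact hp
  obtain ⟨pf, hpf, he⟩ := List.mem_map.mp this
  exact ⟨pf, hpf, he⟩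

-- ---------- the canonical state and the two elimination strategies ----------
def updF (F : Int → List String) (q : Int) (l : List String) : Int → List String :=
  fun r => if r = q then l else F r

def pvInner (n : Int) (f : String) (F : Int → List String) : Int → List String :=
  (PySem.List.pyRange 0 n).foldl
    (fun F q => if (F q).length > 1 ∧ f ∈ F q then updF F q ((F q).erase f) else F) F

def pvPassF (n : Int) (F : Int → List String) : Int → List String :=
  (PySem.List.pyRange 0 n).foldl
    (fun F p => if (F p).length = 1 then pvInner n ((F p).getD 0 "") F else F) F

def pvUniqueF (n : Int) (F : Int → List String) : Bool :=
  (PySem.List.pyRange 0 n).all (fun p => !(decide ((F p).length > 1)))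

def pvWhileF (n : Int) : Nat → (Int → List String) → (Int → List String)
  | 0, F => F
  | fuel + 1, F => if pvUniqueF n F then F else pvWhileF n fuel (pvPassF n F)

def pvWlStep (f : String) :
    ((Int → List String) × List Int) → Int → ((Int → List String) × List Int) :=
  fun st r =>
    if (st.1 r).length > 1 ∧ f ∈ st.1 r then
      if ((updF st.1 r ((st.1 r).erase f)) r).length = 1 then
        (updF st.1 r ((st.1 r).erase f), st.2 ++ [r])
      else (updF st.1 r ((st.1 r).erase f), st.2)
    else st

def pvWlF (n : Int) : Nat → (Int → List String) → List Int → (Int → List String)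
  | 0, F, _ => F
  | _ + 1, F, [] => F
  | fuel + 1, F, q :: rest =>
    let f := (F q).getD 0 ""
    let st := (PySem.List.pyRange 0 n).foldl (pvWlStep f) (F, rest)
    pvWlF n fuel st.1 st.2

def sumLen (n : Int) (F : Int → List String) : Nat :=
  ((PySem.List.pyRange 0 n).map (fun p => (F p).length)).sum

def nbig (n : Int) (F : Int → List String) : Nat :=
  ((PySem.List.pyRange 0 n).filter (fun p => decide (1 < (F p).length))).length

-- the invariant: the forced assignment survives, candidates only shrink, lists stay duplicate-free
def pvInv (n : Int) (cand : Int → List String) (sA : List (Int × String))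
    (F : Int → List String) : Prop :=
  (∀ pf ∈ sA, pf.2 ∈ F pf.1) ∧
  ∀ p ∈ PySem.List.pyRange 0 n, (∀ g ∈ F p, g ∈ cand p) ∧ (F p).Nodup

-- ---------- core: a stalled state under the invariant is fully resolved ----------
lemma pvStall (n : Int) (cand : Int → List String) :
    ∀ (l' : List Int) (used : List String) (F : Int → List String),
      cascadeOk cand l' used = true →
      (∀ pf ∈ elimAssign cand l' used, pf.2 ∈ F pf.1) →
      (∀ p ∈ l', (∀ g ∈ F p, g ∈ cand p) ∧ (F p).Nodup) →
      (∀ p ∈ PySem.List.pyRange 0 n, ∀ q ∈ PySem.List.pyRange 0 n,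
        (F p).length = 1 → 1 < (F q).length → (F p).getD 0 "" ∉ F q) →
      (∀ g ∈ used, ∃ p₀ ∈ PySem.List.pyRange 0 n, F p₀ = [g]) →
      (∀ p ∈ l', p ∈ PySem.List.pyRange 0 n) →
      ∀ pf ∈ elimAssign cand l' used, F pf.1 = [pf.2] := by
  intro l'
  induction l' with
  | nil => intro used F _ _ _ _ _ _ pf hpf; simp [elimAssign] at hpf
  | cons p rest ih =>
    intro used F hca hmem hprops hstall hused hsub
    rw [cascadeOk_cons, Bool.and_eq_true, decide_eq_true_eq] at hca
    obtain ⟨hlen, hca'⟩ := hca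
    have hpl : p ∈ p :: rest := List.mem_cons_self
    have hprng : p ∈ PySem.List.pyRange 0 n := hsub p hpl
    have hf : elimForced cand used p ∈ F p := by
      refine hmem (p, elimForced cand used p) ?_
      rw [elimAssign_cons]
      exact List.mem_cons_self
    have hFp : F p = [elimForced cand used p] := by
      rcases Nat.lt_or_ge 1 (F p).length with hlt | hle
      · exfalso
        obtain ⟨g, hg, hgf⟩ := pv_exists_ne_of_one_lt hlt (hprops p hpl).2 (elimForced cand used p)
        by_cases hu : g ∈ used
        · obtain ⟨p₀, hp₀, hFp₀⟩ := hused g hu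
          have hni := hstall p₀ hp₀ p hprng (by rw [hFp₀]; rfl) hlt
          rw [hFp₀] at hni
          exact absurd hg (by simpa using hni)
        · have hm : g ∈ (cand p).filter (fun g => decide (g ∉ used)) :=
            List.mem_filter.mpr ⟨(hprops p hpl).1 g hg, by simpa using hu⟩
          rw [pv_len_one_getD hlen ""] at hm
          exact hgf (by simpa [elimForced] using hm)
      · have : 1 ≤ (F p).length := List.length_pos_of_mem hf
        exact pv_len_one_of_mem (by omega) hf
    intro pf hpf
    rw [elimAssign_cons] at hpf
    rcases List.mem_cons.mp hpf with h1 | hpf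
    · rw [h1]; exact hFp
    · refine ih (used ++ [elimForced cand used p]) F hca'
        (fun qf hqf => hmem qf (by rw [elimAssign_cons]; exact List.mem_cons_of_mem _ hqf))
        (fun q hq => hprops q (List.mem_cons_of_mem p hq))
        hstall
        (fun g hg => by
          rcases List.mem_append.mp hg with hg | hg
          · exact hused g hg
          · exact ⟨p, hprng, by rw [List.mem_singleton.mp hg]; exact hFp⟩)
        (fun q hq => hsub q (List.mem_cons_of_mem p hq))
        pf hpf

-- ---------- sums over a single-position update ----------
lemma pv_sum_updF (L : List Int) (hnd : L.Nodup) (r : Int) (hr : r ∈ L)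
    (F : Int → List String) (l : List String) :
    ((L.map (fun p => ((updF F r l) p).length)).sum + (F r).length
      = (L.map (fun p => (F p).length)).sum + l.length) := by
  induction L with
  | nil => simp at hr
  | cons x L ih =>
    simp only [List.nodup_cons] at hnd
    rcases List.mem_cons.mp hr with rfl | hr
    · have : ∀ p ∈ L, (updF F r l p).length = (F p).length := by
        intro p hp
        have : p ≠ r := fun e => hnd.1 (e ▸ hp)
        simp [updF, this]
      rw [List.map_cons, List.map_cons, List.sum_cons, List.sum_cons,
        List.map_congr_left this]
      simp [updF]
      omega
    · have hxr : x ≠ r := fun e => hnd.1 (e ▸ hr)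
      have hih := ih hnd.2 hr
      have hx : updF F r l x = F x := by simp [updF, hxr]
      rw [List.map_cons, List.map_cons, List.sum_cons, List.sum_cons, hx]
      omega

-- ---------- invariant preservation ----------
lemma pv_sol_head (n : Int) (cand : Int → List String) (l : List Int)
    (hl : l.Perm (PySem.List.pyRange 0 n)) (F : Int → List String)
    (hInv : pvInv n cand (elimAssign cand l []) F) {p : Int}
    (hp : p ∈ PySem.List.pyRange 0 n) (h1 : (F p).length = 1) :
    (p, (F p).getD 0 "") ∈ elimAssign cand l [] ∧ F p = [(F p).getD 0 ""] := by
  obtain ⟨pf, hpf, hfst⟩ := elim_cover cand l (hl.mem_iff.mpr hp)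
  have hm : pf.2 ∈ F p := hfst ▸ hInv.1 pf hpf
  have hFp : F p = [pf.2] := pv_len_one_of_mem h1 hm
  have hget : (F p).getD 0 "" = pf.2 := by rw [hFp]; rfl
  refine ⟨?_, by rw [hget, hFp]⟩
  have he : (p, pf.2) = pf := by rw [← hfst]
  rw [hget, he]
  exact hpf

lemma pvStepInv (n : Int) (cand : Int → List String) (l : List Int)
    (hl : l.Perm (PySem.List.pyRange 0 n)) (hca : cascadeOk cand l [] = true)
    (F : Int → List String) (hInv : pvInv n cand (elimAssign cand l []) F)
    {p : Int} (hp : p ∈ PySem.List.pyRange 0 n) (h1 : (F p).length = 1)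
    {r : Int} (hr : r ∈ PySem.List.pyRange 0 n) (hbig : 1 < (F r).length) :
    pvInv n cand (elimAssign cand l []) (updF F r ((F r).erase ((F p).getD 0 ""))) := by
  have hnd : l.Nodup := hl.nodup_iff.mpr (PySem.List.nodup_pyRange_one 0 n)
  obtain ⟨hsol, hFp⟩ := pv_sol_head n cand l hl F hInv hp h1
  have hpr : p ≠ r := fun e => by rw [e] at h1; omega
  constructor
  · intro qf hqf
    by_cases hqr : qf.1 = r
    · have hne : qf.2 ≠ (F p).getD 0 "" := by
        have := elim_inj cand l hca hqf hsol (by rw [hqr]; exact fun e => hpr e.symm)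
        simpa using this
      have : qf.2 ∈ F r := hqr ▸ hInv.1 qf hqf
      simp only [updF, hqr, if_pos]
      exact (List.mem_erase_of_ne hne).mpr this
    · simp only [updF, if_neg hqr]
      exact hInv.1 qf hqf
  · intro q hq
    by_cases hqr : q = r
    · subst hqr
      constructor
      · intro g hg
        exact (hInv.2 q hq).1 g (List.mem_of_mem_erase (by simpa [updF] using hg))
      · simpa [updF] using (hInv.2 q hq).2.erase _
    · simp only [updF, if_neg hqr]
      exact hInv.2 q hq

-- one guarded removal step (shared by A's pass and B's worklist), as a function
def pvRmStep (f : String) (F : Int → List String) (q : Int) : Int → List String :=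
  if (F q).length > 1 ∧ f ∈ F q then updF F q ((F q).erase f) else F

lemma pvRmStep_other (f : String) (F : Int → List String) (x r : Int) (h : r ≠ x) :
    pvRmStep f F x r = F r := by
  unfold pvRmStep
  split
  · simp [updF, h]
  · rfl

lemma pvRmStep_keeps (f : String) (F : Int → List String) (x p : Int)
    (h1 : (F p).length = 1) : pvRmStep f F x p = F p := by
  unfold pvRmStep
  split
  · rename_i hg
    have : p ≠ x := fun e => by rw [e] at h1; omega
    simp [updF, this]
  · rfl

lemma pvRmStep_lazy (n : Int) (f : String) (F : Int → List String) (x : Int)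
    (hx : x ∈ PySem.List.pyRange 0 n) :
    pvRmStep f F x = F ∨ sumLen n (pvRmStep f F x) < sumLen n F := by
  unfold pvRmStep
  split
  · rename_i hg
    right
    have hsum := pv_sum_updF (PySem.List.pyRange 0 n) (PySem.List.nodup_pyRange_one 0 n) x hx F
      ((F x).erase f)
    have hle : ((F x).erase f).length = (F x).length - 1 := List.length_erase_of_mem hg.2
    unfold sumLen
    omega
  · exact Or.inl rfl

lemma pvRmStep_inv (n : Int) (cand : Int → List String) (l : List Int)
    (hl : l.Perm (PySem.List.pyRange 0 n)) (hca : cascadeOk cand l [] = true)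
    (F : Int → List String) (hInv : pvInv n cand (elimAssign cand l []) F)
    {p : Int} (hp : p ∈ PySem.List.pyRange 0 n) (h1 : (F p).length = 1)
    {x : Int} (hx : x ∈ PySem.List.pyRange 0 n) :
    pvInv n cand (elimAssign cand l []) (pvRmStep ((F p).getD 0 "") F x) := by
  unfold pvRmStep
  split
  · rename_i hg
    exact pvStepInv n cand l hl hca F hInv hp h1 hx hg.1
  · exact hInv

-- pvInner is a fold of pvRmStep
lemma pvInner_eq (n : Int) (f : String) (F : Int → List String) :
    pvInner n f F = (PySem.List.pyRange 0 n).foldl (pvRmStep f) F := rfl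

lemma pvInner_inv (n : Int) (cand : Int → List String) (l : List Int)
    (hl : l.Perm (PySem.List.pyRange 0 n)) (hca : cascadeOk cand l [] = true)
    (F : Int → List String) {p : Int} (hp : p ∈ PySem.List.pyRange 0 n)
    (h1 : (F p).length = 1) (hInv : pvInv n cand (elimAssign cand l []) F) :
    pvInv n cand (elimAssign cand l []) (pvInner n ((F p).getD 0 "") F) := by
  rw [pvInner_eq]
  have := pv_foldl_pres
    (fun s => pvInv n cand (elimAssign cand l []) s ∧ s p = F p)
    (pvRmStep ((F p).getD 0 "")) (PySem.List.pyRange 0 n)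
    (fun s x hx hs => by
      constructor
      · have h1' : (s p).length = 1 := by rw [hs.2]; exact h1
        have : (F p).getD 0 "" = (s p).getD 0 "" := by rw [hs.2]
        rw [this]
        exact pvRmStep_inv n cand l hl hca s hs.1 hp h1' hx
      · rw [pvRmStep_keeps _ _ _ _ (by rw [hs.2]; exact h1)]
        exact hs.2)
    F ⟨hInv, rfl⟩
  exact this.1

lemma pvInner_lazy (n : Int) (f : String) (F : Int → List String) :
    pvInner n f F = F ∨ sumLen n (pvInner n f F) < sumLen n F := by
  rw [pvInner_eq]
  exact pv_foldl_lazy (sumLen n) (pvRmStep f) _ (fun s x hx => pvRmStep_lazy n f s x hx) F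

lemma pvInner_strict (n : Int) (f : String) (F : Int → List String) {q : Int}
    (hq : q ∈ PySem.List.pyRange 0 n) (hbig : 1 < (F q).length) (hmem : f ∈ F q) :
    sumLen n (pvInner n f F) < sumLen n F := by
  obtain ⟨L1, L2, hsplit⟩ := List.append_of_mem hq
  have hnd : (PySem.List.pyRange 0 n).Nodup := PySem.List.nodup_pyRange_one 0 n
  have hnd' := hnd
  rw [hsplit, List.nodup_middle, List.nodup_cons] at hnd'
  have hq1 : q ∉ L1 := fun hm => hnd'.1 (List.mem_append_left _ hm)
  have hsub1 : ∀ x ∈ L1, x ∈ PySem.List.pyRange 0 n := by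
    intro x hx; rw [hsplit]; exact List.mem_append_left _ hx
  have hsub2 : ∀ x ∈ L2, x ∈ PySem.List.pyRange 0 n := by
    intro x hx; rw [hsplit]; exact List.mem_append_right _ (List.mem_cons_of_mem q hx)
  rw [pvInner_eq, hsplit, List.foldl_append, List.foldl_cons]
  set s₁ := L1.foldl (pvRmStep f) F with hs₁
  have hkeep : s₁ q = F q := by
    rw [hs₁]
    exact pv_foldl_eval_of_not_mem (fun s x => pvRmStep f s x) L1
      (fun s x r hx hr => pvRmStep_other f s x r hr) q hq1 F
  have hstep : sumLen n (pvRmStep f s₁ q) < sumLen n s₁ := by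
    unfold pvRmStep
    rw [if_pos (by rw [hkeep]; exact ⟨hbig, hmem⟩)]
    have hsum := pv_sum_updF (PySem.List.pyRange 0 n) hnd q hq s₁ ((s₁ q).erase f)
    have : ((s₁ q).erase f).length = (s₁ q).length - 1 :=
      List.length_erase_of_mem (by rw [hkeep]; exact hmem)
    have hpos : 1 < (s₁ q).length := by rw [hkeep]; exact hbig
    unfold sumLen
    omega
  have hle1 : sumLen n s₁ ≤ sumLen n F :=
    pv_foldl_lazy_le (sumLen n) (pvRmStep f) L1
      (fun s x hx => pvRmStep_lazy n f s x (hsub1 x hx)) F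
  have hle2 : sumLen n (L2.foldl (pvRmStep f) (pvRmStep f s₁ q)) ≤ sumLen n (pvRmStep f s₁ q) :=
    pv_foldl_lazy_le (sumLen n) (pvRmStep f) L2
      (fun s x hx => pvRmStep_lazy n f s x (hsub2 x hx)) _
  calc sumLen n (L2.foldl (pvRmStep f) (pvRmStep f s₁ q)) ≤ sumLen n (pvRmStep f s₁ q) := hle2
    _ < sumLen n s₁ := hstep
    _ ≤ sumLen n F := hle1

-- the outer step of A's pass
def pvPassStep (n : Int) (F : Int → List String) (p : Int) : Int → List String :=
  if (F p).length = 1 then pvInner n ((F p).getD 0 "") F else F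

lemma pvPassF_eq (n : Int) (F : Int → List String) :
    pvPassF n F = (PySem.List.pyRange 0 n).foldl (pvPassStep n) F := rfl

lemma pvPassStep_lazy (n : Int) (F : Int → List String) (p : Int) :
    pvPassStep n F p = F ∨ sumLen n (pvPassStep n F p) < sumLen n F := by
  unfold pvPassStep
  split
  · exact pvInner_lazy n _ F
  · exact Or.inl rfl

lemma pvPass_inv (n : Int) (cand : Int → List String) (l : List Int)
    (hl : l.Perm (PySem.List.pyRange 0 n)) (hca : cascadeOk cand l [] = true)
    (F : Int → List String) (hInv : pvInv n cand (elimAssign cand l []) F) :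
    pvInv n cand (elimAssign cand l []) (pvPassF n F) := by
  rw [pvPassF_eq]
  exact pv_foldl_pres (pvInv n cand (elimAssign cand l [])) (pvPassStep n) _
    (fun s x hx hs => by
      unfold pvPassStep
      split
      · rename_i h1
        exact pvInner_inv n cand l hl hca s hx h1 hs
      · exact hs)
    F hInv

lemma pvPass_strict (n : Int) (F : Int → List String) {p q : Int}
    (hp : p ∈ PySem.List.pyRange 0 n) (h1 : (F p).length = 1)
    (hq : q ∈ PySem.List.pyRange 0 n) (hbig : 1 < (F q).length)
    (hmem : (F p).getD 0 "" ∈ F q) :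
    sumLen n (pvPassF n F) < sumLen n F := by
  obtain ⟨L1, L2, hsplit⟩ := List.append_of_mem hp
  rw [pvPassF_eq, hsplit, List.foldl_append, List.foldl_cons]
  have hle2 : ∀ s, sumLen n (L2.foldl (pvPassStep n) s) ≤ sumLen n s := fun s =>
    pv_foldl_lazy_le (sumLen n) (pvPassStep n) L2
      (fun s x _ => pvPassStep_lazy n s x) s
  rcases pv_foldl_lazy (sumLen n) (pvPassStep n) L1
      (fun s x _ => pvPassStep_lazy n s x) F with he | hlt
  · rw [he]
    have hstep : sumLen n (pvPassStep n F p) < sumLen n F := by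
      unfold pvPassStep
      rw [if_pos h1]
      exact pvInner_strict n _ F hq hbig hmem
    calc sumLen n (L2.foldl (pvPassStep n) (pvPassStep n F p)) ≤ _ := hle2 _
      _ < sumLen n F := hstep
  · have hlazy : sumLen n (pvPassStep n (L1.foldl (pvPassStep n) F) p)
        ≤ sumLen n (L1.foldl (pvPassStep n) F) := by
      rcases pvPassStep_lazy n (L1.foldl (pvPassStep n) F) p with he | h
      · rw [he]
      · exact le_of_lt h
    calc sumLen n (L2.foldl (pvPassStep n) _) ≤ _ := hle2 _
      _ ≤ sumLen n (L1.foldl (pvPassStep n) F) := hlazy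
      _ < sumLen n F := hlt

-- ---------- A's while loop reaches the forced assignment ----------
lemma pvWhile_reaches (n : Int) (cand : Int → List String) (l : List Int)
    (hl : l.Perm (PySem.List.pyRange 0 n)) (hca : cascadeOk cand l [] = true) :
    ∀ (fuel : Nat) (F : Int → List String),
      pvInv n cand (elimAssign cand l []) F →
      sumLen n F ≤ fuel + (PySem.List.pyRange 0 n).length →
      ∀ pf ∈ elimAssign cand l [], pvWhileF n fuel F pf.1 = [pf.2] := by
  intro fuel
  induction fuel with
  | zero =>
    intro F hInv hsum pf hpf
    have hpos : ∀ x ∈ PySem.List.pyRange 0 n, 1 ≤ (F x).length := by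
      intro x hx
      obtain ⟨qf, hqf, hfst⟩ := elim_cover cand l (hl.mem_iff.mpr hx)
      exact List.length_pos_of_mem (hfst ▸ hInv.1 qf hqf)
    have hall := pv_all_len_one (PySem.List.pyRange 0 n) (fun x => (F x).length) hpos
      (by simpa [sumLen] using hsum)
    have hrng : pf.1 ∈ PySem.List.pyRange 0 n :=
      hl.mem_iff.mp ((elim_fst cand l []) ▸ List.mem_map_of_mem (f := Prod.fst) hpf)
    exact pv_len_one_of_mem (hall pf.1 hrng) (hInv.1 pf hpf)
  | succ fuel ih =>
    intro F hInv hsum pf hpf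
    show (if pvUniqueF n F then F else pvWhileF n fuel (pvPassF n F)) pf.1 = [pf.2]
    by_cases hu : pvUniqueF n F = true
    · rw [if_pos hu]
      have hrng : pf.1 ∈ PySem.List.pyRange 0 n :=
        hl.mem_iff.mp ((elim_fst cand l []) ▸ List.mem_map_of_mem (f := Prod.fst) hpf)
      have hle : ¬ 1 < (F pf.1).length := by
        have := List.all_eq_true.mp hu pf.1 hrng
        simpa using this
      have : 1 ≤ (F pf.1).length := List.length_pos_of_mem (hInv.1 pf hpf)
      exact pv_len_one_of_mem (by omega) (hInv.1 pf hpf)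
    · rw [if_neg hu]
      have hbigex : ∃ q ∈ PySem.List.pyRange 0 n, 1 < (F q).length := by
        by_contra hno
        push_neg at hno
        exact hu (List.all_eq_true.mpr (fun q hq => by simpa using hno q hq))
      obtain ⟨q0, hq0, hq0big⟩ := hbigex
      by_cases hst : ∀ p ∈ PySem.List.pyRange 0 n, ∀ q ∈ PySem.List.pyRange 0 n,
          (F p).length = 1 → 1 < (F q).length → (F p).getD 0 "" ∉ F q
      · exfalso
        have hall := pvStall n cand l [] F hca hInv.1
          (fun p hp => hInv.2 p (hl.mem_iff.mp hp)) hst (by simp)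
          (fun p hp => hl.mem_iff.mp hp)
        obtain ⟨qf, hqf, hfst⟩ := elim_cover cand l (hl.mem_iff.mpr hq0)
        have := hall qf hqf
        rw [hfst] at this
        rw [this] at hq0big
        simp at hq0big
      · push_neg at hst
        obtain ⟨p, hp, q, hq, h1, hbig, hmem⟩ := hst
        exact ih (pvPassF n F)
          (pvPass_inv n cand l hl hca F hInv)
          (by have := pvPass_strict n F hp h1 hq hbig hmem; omega)
          pf hpf

-- ---------- B's worklist loop ----------
def pvCross (f : String) (F : Int → List String) (r : Int) : Bool :=
  decide (1 < (F r).length ∧ f ∈ F r ∧ ((F r).erase f).length = 1)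

def pvGF (f : String) (F : Int → List String) (L : List Int) : Int → List String :=
  fun r => if r ∈ L ∧ 1 < (F r).length ∧ f ∈ F r then (F r).erase f else F r

lemma pvWlInner_spec (f : String) : ∀ (L : List Int), L.Nodup →
    ∀ (F : Int → List String) (Q : List Int),
      L.foldl (pvWlStep f) (F, Q) = (pvGF f F L, Q ++ L.filter (pvCross f F)) := by
  intro L
  induction L with
  | nil =>
    intro _ F Q
    refine Prod.ext ?_ (by simp)
    funext r
    simp [pvGF]
  | cons r T ih =>
    intro hnd F Q
    rw [List.nodup_cons] at hnd
    rw [List.foldl_cons]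
    by_cases hg : 1 < (F r).length ∧ f ∈ F r
    · have hupd : (updF F r ((F r).erase f)) r = (F r).erase f := by simp [updF]
      have hstep : pvWlStep f (F, Q) r
          = (updF F r ((F r).erase f),
             if ((F r).erase f).length = 1 then Q ++ [r] else Q) := by
        unfold pvWlStep
        rw [if_pos (by exact hg)]
        by_cases hc : ((updF F r ((F r).erase f)) r).length = 1
        · rw [if_pos hc, if_pos (by rwa [hupd] at hc)]
        · rw [if_neg hc, if_neg (by rwa [hupd] at hc)]
      rw [hstep]
      set F₁ := updF F r ((F r).erase f) with hF₁
      have hF₁r : ∀ x, x ≠ r → F₁ x = F x := by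
        intro x hx; simp [hF₁, updF, hx]
      have hF₁self : F₁ r = (F r).erase f := by simp [hF₁, updF]
      rw [ih hnd.2]
      refine Prod.ext ?_ ?_
      · show pvGF f F₁ T = pvGF f F (r :: T)
        funext x
        by_cases hxr : x = r
        · subst hxr
          have h1 : pvGF f F₁ T x = F₁ x := by
            simp [pvGF, fun h => hnd.1 h]
          have h2 : pvGF f F (x :: T) x = (F x).erase f := by
            simp [pvGF, hg]
          rw [h1, h2, hF₁self]
        · have hFx : F₁ x = F x := hF₁r x hxr
          by_cases hxT : x ∈ T
          · simp [pvGF, hxT, hFx, hxr]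
          · simp [pvGF, hxT, hFx, hxr]
      · show (if ((F r).erase f).length = 1 then Q ++ [r] else Q) ++ T.filter (pvCross f F₁)
            = Q ++ (r :: T).filter (pvCross f F)
        have hfc : T.filter (pvCross f F₁) = T.filter (pvCross f F) := by
          apply List.filter_congr
          intro x hx
          have : F₁ x = F x := hF₁r x (fun e => hnd.1 (e ▸ hx))
          simp [pvCross, this]
        rw [hfc, List.filter_cons]
        by_cases hc : ((F r).erase f).length = 1
        · rw [if_pos hc, if_pos (by simp [pvCross, hg.1, hg.2, hc])]
          simp
        · rw [if_neg hc, if_neg (by simp [pvCross, hc])]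
    · have hstep : pvWlStep f (F, Q) r = (F, Q) := by
        unfold pvWlStep
        rw [if_neg (by exact hg)]
      rw [hstep, ih hnd.2]
      refine Prod.ext ?_ ?_
      · show pvGF f F T = pvGF f F (r :: T)
        funext x
        by_cases hxr : x = r
        · subst hxr
          have h1 : pvGF f F T x = F x := by simp [pvGF, fun h => hnd.1 h]
          have h2 : pvGF f F (x :: T) x = F x := by
            simp only [pvGF]
            rw [if_neg (by rintro ⟨-, h⟩; exact hg h)]
          rw [h1, h2]
        · by_cases hxT : x ∈ T <;> simp [pvGF, hxT, hxr]
      · show Q ++ T.filter (pvCross f F) = Q ++ (r :: T).filter (pvCross f F)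
        rw [List.filter_cons, if_neg (by simp [pvCross]; intro h1 h2; exact absurd ⟨h1, h2⟩ hg)]

lemma pv_nbig_G (n : Int) (f : String) (F : Int → List String) :
    nbig n (pvGF f F (PySem.List.pyRange 0 n))
      + ((PySem.List.pyRange 0 n).filter (pvCross f F)).length = nbig n F := by
  unfold nbig
  have hcongr : (PySem.List.pyRange 0 n).filter
      (fun p => decide (1 < ((pvGF f F (PySem.List.pyRange 0 n)) p).length))
      = (PySem.List.pyRange 0 n).filter
      (fun p => decide (1 < (F p).length) && !(pvCross f F p)) := by
    apply List.filter_congr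
    intro x hx
    by_cases hg : 1 < (F x).length ∧ f ∈ F x
    · have hGx : pvGF f F (PySem.List.pyRange 0 n) x = (F x).erase f := by
        simp [pvGF, hx, hg.1, hg.2]
      have hlen : ((F x).erase f).length = (F x).length - 1 := List.length_erase_of_mem hg.2
      by_cases hc : ((F x).erase f).length = 1
      · have hcr : pvCross f F x = true := decide_eq_true ⟨hg.1, hg.2, hc⟩
        have hng : ¬ 1 < ((pvGF f F (PySem.List.pyRange 0 n)) x).length := by rw [hGx]; omega
        simp [hng, hcr]
      · have hcr : pvCross f F x = false :=
          decide_eq_false (fun h => hc h.2.2)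
        have hyg : 1 < ((pvGF f F (PySem.List.pyRange 0 n)) x).length := by rw [hGx]; omega
        simp [hyg, hcr, hg.1]
    · have hGx : pvGF f F (PySem.List.pyRange 0 n) x = F x := by
        simp only [pvGF]
        rw [if_neg (by rintro ⟨-, h1, h2⟩; exact hg ⟨h1, h2⟩)]
      have hcx : pvCross f F x = false := by
        simp only [pvCross, decide_eq_false_iff_not]
        rintro ⟨h1, h2, -⟩
        exact hg ⟨h1, h2⟩
      simp [hGx, hcx]
  rw [hcongr]
  exact pv_filter_partition_length (PySem.List.pyRange 0 n)
    (fun p => decide (1 < (F p).length)) (pvCross f F)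
    (fun x hx hc => by
      simp only [pvCross, decide_eq_true_eq] at hc
      simpa using hc.1)

lemma pvWl_reaches (n : Int) (cand : Int → List String) (l : List Int)
    (hl : l.Perm (PySem.List.pyRange 0 n)) (hca : cascadeOk cand l [] = true) :
    ∀ (fuel : Nat) (F : Int → List String) (queue : List Int),
      pvInv n cand (elimAssign cand l []) F →
      (∀ p ∈ queue, p ∈ PySem.List.pyRange 0 n ∧ (F p).length = 1) →
      (∀ p ∈ PySem.List.pyRange 0 n, (F p).length = 1 → p ∈ queue ∨
        ∀ q ∈ PySem.List.pyRange 0 n, 1 < (F q).length → (F p).getD 0 "" ∉ F q) →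
      queue.length + nbig n F < fuel →
      ∀ pf ∈ elimAssign cand l [], pvWlF n fuel F queue pf.1 = [pf.2] := by
  intro fuel
  induction fuel with
  | zero => intro F queue _ _ _ hm; omega
  | succ fuel ih =>
    intro F queue hInv hQ hcov hm
    match queue with
    | [] =>
      intro pf hpf
      show F pf.1 = [pf.2]
      have hst : ∀ p ∈ PySem.List.pyRange 0 n, ∀ q ∈ PySem.List.pyRange 0 n,
          (F p).length = 1 → 1 < (F q).length → (F p).getD 0 "" ∉ F q := by
        intro p hp q hq h1 hbig
        rcases hcov p hp h1 with hfalse | hok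
        · simp at hfalse
        · exact hok q hq hbig
      exact pvStall n cand l [] F hca hInv.1
        (fun p hp => hInv.2 p (hl.mem_iff.mp hp)) hst (by simp)
        (fun p hp => hl.mem_iff.mp hp) pf hpf
    | q :: rest =>
      obtain ⟨hqrng, hqlen⟩ := hQ q List.mem_cons_self
      obtain ⟨hsol, hFq⟩ := pv_sol_head n cand l hl F hInv hqrng hqlen
      set f := (F q).getD 0 "" with hfdef
      have hrw : pvWlF n (fuel + 1) F (q :: rest)
          = pvWlF n fuel (pvGF f F (PySem.List.pyRange 0 n))
              (rest ++ (PySem.List.pyRange 0 n).filter (pvCross f F)) := by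
        show pvWlF n fuel ((PySem.List.pyRange 0 n).foldl (pvWlStep f) (F, rest)).1
              ((PySem.List.pyRange 0 n).foldl (pvWlStep f) (F, rest)).2 = _
        rw [pvWlInner_spec f (PySem.List.pyRange 0 n) (PySem.List.nodup_pyRange_one 0 n) F rest]
      rw [hrw]
      set G := pvGF f F (PySem.List.pyRange 0 n) with hGdef
      set news := (PySem.List.pyRange 0 n).filter (pvCross f F) with hnews
      have hGcase : ∀ x, (G x = (F x).erase f ∧ x ∈ PySem.List.pyRange 0 n
            ∧ 1 < (F x).length ∧ f ∈ F x) ∨ G x = F x := by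
        intro x
        by_cases hg : x ∈ PySem.List.pyRange 0 n ∧ 1 < (F x).length ∧ f ∈ F x
        · exact Or.inl ⟨by simp [hGdef, pvGF, hg.1, hg.2.1, hg.2.2], hg.1, hg.2⟩
        · refine Or.inr ?_
          simp only [hGdef, pvGF]
          rw [if_neg hg]
      have hInvG : pvInv n cand (elimAssign cand l []) G := by
        constructor
        · intro qf hqf
          rcases hGcase qf.1 with ⟨he, _, hbig, _⟩ | he
          · rw [he]
            have hne : qf.2 ≠ f := by
              have := elim_inj cand l hca hqf hsol (fun e => by
                  rw [e, show ((q, f).1 : Int) = q from rfl] at hbig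
                  omega)
              simpa using this
            exact (List.mem_erase_of_ne hne).mpr (hInv.1 qf hqf)
          · rw [he]; exact hInv.1 qf hqf
        · intro p hp
          rcases hGcase p with ⟨he, _, _, _⟩ | he
          · rw [he]
            exact ⟨fun g hg => (hInv.2 p hp).1 g (List.mem_of_mem_erase hg),
              (hInv.2 p hp).2.erase f⟩
          · rw [he]; exact hInv.2 p hp
      have hQ' : ∀ p ∈ rest ++ news, p ∈ PySem.List.pyRange 0 n ∧ (G p).length = 1 := by
        intro p hp
        rcases List.mem_append.mp hp with hp | hp
        · obtain ⟨hpr, hpl⟩ := hQ p (List.mem_cons_of_mem q hp)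
          have : G p = F p := by
            rcases hGcase p with ⟨-, -, hbig, -⟩ | he
            · omega
            · exact he
          exact ⟨hpr, by rw [this]; exact hpl⟩
        · rw [hnews] at hp
          have hmem := List.mem_filter.mp hp
          have hc := of_decide_eq_true hmem.2
          refine ⟨hmem.1, ?_⟩
          have : G p = (F p).erase f := by
            simp [hGdef, pvGF, hmem.1, hc.1, hc.2.1]
          rw [this]
          exact hc.2.2
      have hsub : ∀ x, 1 < (G x).length → 1 < (F x).length ∧ ∀ g ∈ G x, g ∈ F x := by
        intro x hbig
        rcases hGcase x with ⟨he, -, hb, hmemf⟩ | he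
        · rw [he] at hbig ⊢
          exact ⟨hb, fun g hg => List.mem_of_mem_erase hg⟩
        · rw [he] at hbig ⊢
          exact ⟨hbig, fun g hg => hg⟩
      have hcov' : ∀ p ∈ PySem.List.pyRange 0 n, (G p).length = 1 → p ∈ rest ++ news ∨
          ∀ q' ∈ PySem.List.pyRange 0 n, 1 < (G q').length → (G p).getD 0 "" ∉ G q' := by
        intro p hp hGp1
        by_cases hcond : 1 < (F p).length ∧ f ∈ F p
        · have hGe : G p = (F p).erase f := by simp [hGdef, pvGF, hp, hcond.1, hcond.2]
          left
          refine List.mem_append_right _ ?_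
          rw [hnews]
          exact List.mem_filter.mpr ⟨hp,
            decide_eq_true ⟨hcond.1, hcond.2, by rw [← hGe]; exact hGp1⟩⟩
        · have hGe : G p = F p := by
            simp only [hGdef, pvGF]
            rw [if_neg (by rintro ⟨-, h1, h2⟩; exact hcond ⟨h1, h2⟩)]
          have hFp1 : (F p).length = 1 := by rw [← hGe]; exact hGp1
          rcases hcov p hp hFp1 with hin | hok
          · rcases List.mem_cons.mp hin with heq | hin
            · right
              intro q' hq' hbig'
              have hgd : (G p).getD 0 "" = f := by rw [hGe, heq]
              rw [hgd]
              by_cases hcond' : 1 < (F q').length ∧ f ∈ F q'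
              · have hGe' : G q' = (F q').erase f := by
                  simp [hGdef, pvGF, hq', hcond'.1, hcond'.2]
                rw [hGe']
                exact (hInv.2 q' hq').2.not_mem_erase
              · have hGe' : G q' = F q' := by
                  simp only [hGdef, pvGF]
                  rw [if_neg (by rintro ⟨-, h1, h2⟩; exact hcond' ⟨h1, h2⟩)]
                rw [hGe'] at hbig' ⊢
                intro hmem'
                exact hcond' ⟨hbig', hmem'⟩
            · exact Or.inl (List.mem_append_left _ hin)
          · right
            intro q' hq' hbig'
            obtain ⟨hbF, hsubq⟩ := hsub q' hbig'
            have hgd : (G p).getD 0 "" = (F p).getD 0 "" := by rw [hGe]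
            rw [hgd]
            intro hmem'
            exact hok q' hq' hbF (hsubq _ hmem')
      have hm' : (rest ++ news).length + nbig n G < fuel := by
        have hpart := pv_nbig_G n f F
        rw [List.length_append]
        simp only [List.length_cons] at hm
        rw [← hGdef, ← hnews] at hpart
        omega
      exact ih G (rest ++ news) hInvG hQ' hcov' hm'

-- ---------- phase 1: both ports compute the declarative candidate lists ----------
-- A's phase-1 candidate list for position p, exactly as port A computes it
def pvCandA (tickets : List String) (vv : PySem.Dict String (List Int)) (p : Int) : List String :=
  vv.keys.filter (fun field =>
    (tickets.map (fun t => PySem.List.pyGetD (pvSplit t) p "")).all (fun value =>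
      decide ((PySem.Int.ofStr? value).getD 0 ∈ vv.getD field [])))

-- A's inner `for field` loop only ever appends to the list stored at key p
lemma pvA_inner (p : Int) (cond : String → Bool) (l : List String)
    (d : PySem.Dict Int (List String)) (cur : List String) :
    l.foldl (fun fs f => if cond f then fs.modify p [] (fun xs => xs ++ [f]) else fs)
      (d.insert p cur) = d.insert p (cur ++ l.filter cond) := by
  induction l generalizing cur with
  | nil => simp
  | cons f l ih =>
    rw [List.foldl_cons]
    by_cases h : cond f
    · rw [if_pos h]
      have hacc : (d.insert p cur).modify p [] (fun xs => xs ++ [f]) = d.insert p (cur ++ [f]) := by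
        simp [PySem.Dict.modify, PySem.Dict.getD_insert_self, PySem.Dict.insert_insert_self]
      rw [hacc, ih (cur ++ [f])]
      simp [h]
    · rw [if_neg h, ih cur]
      simp [h]

-- one step of A's outer `for position` loop stores exactly the candidate list
lemma pvA_step (tickets : List String) (vv : PySem.Dict String (List Int))
    (d : PySem.Dict Int (List String)) (p : Int) :
    (vv.keys.foldl (fun fields field =>
        let found := (tickets.foldl (fun values ticket =>
            values ++ [PySem.List.pyGetD (pvSplit ticket) p ""]) []).all (fun value =>
          decide ((PySem.Int.ofStr? value).getD 0 ∈ vv.getD field []))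
        if found then fields.modify p [] (fun l => l ++ [field]) else fields)
      (d.insert p []))
      = d.insert p (pvCandA tickets vv p) := by
  simp only [PySem.List.foldl_append_singleton_eq_map, List.nil_append]
  exact pvA_inner p _ vv.keys d []

-- A's phase-1 loop: a fold inserting fresh keys 0..n-1 with their candidate lists
lemma pvA_items (tickets : List String) (vv : PySem.Dict String (List Int)) :
    ((PySem.List.pyRange 0 (vv.size : Nat)).foldl (fun fields position =>
        let fields := fields.insert position []
        let values : List String := tickets.foldl (fun values ticket =>
          values ++ [PySem.List.pyGetD (pvSplit ticket) position ""]) []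
        vv.keys.foldl (fun fields field =>
          let found := values.all (fun value =>
            decide ((PySem.Int.ofStr? value).getD 0 ∈ vv.getD field []))
          if found then fields.modify position [] (fun l => l ++ [field]) else fields)
          fields) PySem.Dict.empty).items
      = (PySem.List.pyRange 0 (vv.size : Nat)).map (fun p => (p, pvCandA tickets vv p)) := by
  rw [PySem.List.foldl_congr_mem _ _
    (fun (d : PySem.Dict Int (List String)) p => d.insert p (pvCandA tickets vv p)) _
    (fun acc x _ => pvA_step tickets vv acc x)]
  have h := PySem.Dict.items_foldl_insert_fresh (PySem.List.pyRange 0 (vv.size : Nat))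
    (fun p => p) (fun p => pvCandA tickets vv p) PySem.Dict.empty
    (fun a _ => PySem.Dict.contains_empty a)
    (by simpa using PySem.List.nodup_pyRange_one 0 (vv.size : Nat))
  simpa using h

-- B's phase-1 fold, same shape (the inserted value is closed over p)
lemma pvB_items (g : Int → List String) (n : Int) :
    ((PySem.List.pyRange 0 n).foldl (fun (d : PySem.Dict Int (List String)) p =>
        d.insert p (g p)) PySem.Dict.empty).items
      = (PySem.List.pyRange 0 n).map (fun p => (p, g p)) := by
  have h := PySem.Dict.items_foldl_insert_fresh (PySem.List.pyRange 0 n)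
    (fun p => p) g PySem.Dict.empty
    (fun a _ => PySem.Dict.contains_empty a)
    (by simpa using PySem.List.nodup_pyRange_one 0 n)
  simpa using h

-- a dict whose items are (p, g p) over a nodup list looks up to g
lemma pv_getD_of_items_map {fields : PySem.Dict Int (List String)} {g : Int → List String}
    {l : List Int} (h : fields.items = l.map (fun p => (p, g p))) (hnd : l.Nodup)
    {p : Int} (hp : p ∈ l) : fields.getD p [] = g p := by
  have hk : fields.keys = l := by
    simp [PySem.Dict.keys, h, Function.comp_def]
  exact PySem.Dict.getD_of_mem_items fields
    (by rw [h]; exact List.mem_map_of_mem hp) (by rw [hk]; exact hnd) []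

-- Bool `all` congruence on members (used to exchange the two parse pipelines)
lemma pv_all_congr {α : Type} (l : List α) (p q : α → Bool) (h : ∀ x ∈ l, p x = q x) :
    l.all p = l.all q := by
  induction l with
  | nil => rfl
  | cons x l ih =>
    simp only [List.all_cons, h x List.mem_cons_self,
      ih (fun y hy => h y (List.mem_cons_of_mem x hy))]

-- under parse-ok at p, A's candidate list is the declarative pvCand
lemma pv_candA_eq (tickets : List String) (vv : PySem.Dict String (List Int)) (p : Int)
    (h : ∀ t ∈ tickets, (pvColVal t p).isSome) :
    pvCandA tickets vv p = pvCand tickets vv p := by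
  unfold pvCandA pvCand
  apply List.filter_congr
  intro f _
  rw [List.all_map]
  apply pv_all_congr
  intro t ht
  obtain ⟨v, hv⟩ := Option.isSome_iff_exists.mp (h t ht)
  simp only [Function.comp]
  obtain ⟨s, hs, hsv⟩ := Option.bind_eq_some_iff.mp hv
  simp [PySem.List.pyGetD, hs, hsv, hv]

-- named copies of the two phase-1 results (proof-side names for the ports' inner lets)
def pvFieldsA (tickets : List String) (vv : PySem.Dict String (List Int)) : PySem.Dict Int (List String) :=
  (PySem.List.pyRange 0 (vv.size : Nat)).foldl (fun fields position =>
    let fields := fields.insert position []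
    let values : List String := tickets.foldl (fun values ticket =>
      values ++ [PySem.List.pyGetD (pvSplit ticket) position ""]) []
    vv.keys.foldl (fun fields field =>
      let found := values.all (fun value =>
        decide ((PySem.Int.ofStr? value).getD 0 ∈ vv.getD field []))
      if found then fields.modify position [] (fun l => l ++ [field]) else fields)
      fields) PySem.Dict.empty

def pvValsets (vv : PySem.Dict String (List Int)) : PySem.Dict String (PySem.Set Int) :=
  vv.keys.foldl (fun d f => d.insert f (PySem.Set.ofList (vv.getD f []))) PySem.Dict.empty

def pvCandB (tickets : List String) (vv : PySem.Dict String (List Int)) (p : Int) : List String :=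
  vv.keys.filter (fun f =>
    (tickets.map (fun t =>
      (PySem.List.slice (pvSplit t) none (some ((vv.size : Nat) : Int))).map
        (fun v => (PySem.Int.ofStr? v).getD 0))).all
      (fun row => PySem.Set.contains ((pvValsets vv).getD f []) (PySem.List.pyGetD row p 0)))

def pvFieldsB (tickets : List String) (vv : PySem.Dict String (List Int)) : PySem.Dict Int (List String) :=
  (PySem.List.pyRange 0 ((vv.size : Nat) : Int)).foldl
    (fun d p => d.insert p (pvCandB tickets vv p)) PySem.Dict.empty

lemma pv_valsets_getD (vv : PySem.Dict String (List Int)) (hnd : vv.keys.Nodup)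
    {f : String} (hf : f ∈ vv.keys) :
    (pvValsets vv).getD f [] = PySem.Set.ofList (vv.getD f []) := by
  have h := PySem.Dict.items_foldl_insert_fresh vv.keys (fun f => f)
    (fun f => PySem.Set.ofList (vv.getD f [])) PySem.Dict.empty
    (fun a _ => PySem.Dict.contains_empty a) (by simpa using hnd)
  apply PySem.Dict.getD_of_mem_items
  · unfold pvValsets
    rw [h]
    exact List.mem_append_right _ (List.mem_map.mpr ⟨f, hf, rfl⟩)
  · unfold pvValsets
    exact PySem.Dict.nodup_keys_foldl_insert _ _ _ (by simp)

-- under parse-ok at p (with p in range), B's candidate list is the declarative pvCand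
lemma pv_candB_eq (tickets : List String) (vv : PySem.Dict String (List Int))
    (hnd : vv.keys.Nodup) (p : Int) (hp : p ∈ PySem.List.pyRange 0 (vv.size : Nat))
    (h : ∀ t ∈ tickets, (pvColVal t p).isSome) :
    pvCandB tickets vv p = pvCand tickets vv p := by
  obtain ⟨hp0, hpn⟩ := PySem.List.mem_pyRange_one.mp hp
  unfold pvCandB pvCand
  apply List.filter_congr
  intro f hf
  rw [List.all_map]
  apply pv_all_congr
  intro t ht
  obtain ⟨v, hv⟩ := Option.isSome_iff_exists.mp (h t ht)
  obtain ⟨s, hs, hsv⟩ := Option.bind_eq_some_iff.mp hv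
  simp only [Function.comp]
  rw [pv_valsets_getD vv hnd hf]
  rw [PySem.List.slice_to _ (by positivity)]
  have hlen : p.toNat < (pvSplit t).length := by
    rw [PySem.List.pyGet?_of_nonneg _ hp0] at hs
    exact (List.getElem?_eq_some_iff.mp hs).1
  have hrow : PySem.List.pyGetD
      ((List.take ((vv.size : Nat) : Int).toNat (pvSplit t)).map (fun v => (PySem.Int.ofStr? v).getD 0)) p 0 = v := by
    rw [PySem.List.pyGetD_of_nonneg _ _ hp0, List.getD_eq_getElem?_getD, List.getElem?_map,
      List.getElem?_take_of_lt (by omega), ← PySem.List.pyGet?_of_nonneg _ hp0, hs]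
    simp [hsv]
  rw [hrow]
  simp [PySem.Set.mem_ofList, pvColVal, hs, hsv]

-- ---------- dict state ↔ canonical state ----------
def pvRel (n : Int) (d : PySem.Dict Int (List String)) (F : Int → List String) : Prop :=
  d.keys = PySem.List.pyRange 0 n ∧ ∀ p ∈ PySem.List.pyRange 0 n, d.getD p [] = F p

lemma pvRel_modify (n : Int) (d : PySem.Dict Int (List String)) (F : Int → List String)
    (hrel : pvRel n d F) (r : Int) (hr : r ∈ PySem.List.pyRange 0 n)
    (g : List String → List String) :
    pvRel n (d.modify r [] g) (updF F r (g (F r))) := by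
  constructor
  · rw [PySem.Dict.keys_modify, PySem.Dict.keys_insert_of_contains]
    · exact hrel.1
    · rw [PySem.Dict.contains_eq_decide_mem_keys, hrel.1]
      exact decide_eq_true hr
  · intro p hp
    rw [PySem.Dict.getD_modify]
    by_cases hpr : p = r
    · rw [if_pos hpr, hrel.2 r hr, hpr]
      simp [updF]
    · rw [if_neg hpr, hrel.2 p hp]
      simp [updF, hpr]

lemma pvRel_unique (n : Int) (d : PySem.Dict Int (List String)) (F : Int → List String)
    (hrel : pvRel n d F) : pvAreFieldsUnique d = pvUniqueF n F := by
  unfold pvAreFieldsUnique pvUniqueF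
  rw [hrel.1]
  exact pv_all_congr _ _ _ (fun p hp => by rw [hrel.2 p hp])

lemma pvRel_rmstep (n : Int) (s : PySem.Dict Int (List String)) (t : Int → List String)
    (f : String) (hrel : pvRel n s t) {y : Int} (hy : y ∈ PySem.List.pyRange 0 n) :
    pvRel n
      (if (s.getD y []).length > 1 ∧ f ∈ s.getD y [] then
        s.modify y [] (fun l => (PySem.List.remove? l f).getD l) else s)
      (pvRmStep f t y) := by
  rw [hrel.2 y hy]
  unfold pvRmStep
  by_cases hg : (t y).length > 1 ∧ f ∈ t y
  · rw [if_pos hg, if_pos hg,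
      show (fun l => (PySem.List.remove? l f).getD l) = fun l : List String => l.erase f from
        funext (fun l => pv_removeD_eq_erase)]
    exact pvRel_modify n s t hrel y hy (fun l => l.erase f)
  · rw [if_neg hg, if_neg hg]
    exact hrel

lemma pvRel_pass (n : Int) (d : PySem.Dict Int (List String)) (F : Int → List String)
    (hrel : pvRel n d F) : pvRel n (pvPassA d) (pvPassF n F) := by
  have hkeys := hrel.1
  show pvRel n (d.keys.foldl _ d) _
  rw [hkeys, pvPassF_eq]
  refine pv_foldl_rel (pvRel n) _ (pvPassStep n) _ ?_ d F hrel
  intro s t x hx hst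
  unfold pvPassStep
  rw [hst.2 x hx]
  by_cases h1 : (t x).length = 1
  · rw [if_pos h1, if_pos h1, pvInner_eq]
    refine pv_foldl_rel (pvRel n) _ (pvRmStep ((t x).getD 0 "")) _ ?_ s t hst
    intro s' t' y hy hst'
    exact pvRel_rmstep n s' t' _ hst' hy
  · rw [if_neg h1, if_neg h1]
    exact hst

lemma pvRel_while (n : Int) : ∀ (fuel : Nat) (d : PySem.Dict Int (List String))
    (F : Int → List String), pvRel n d F →
    pvRel n (pvWhileA fuel d) (pvWhileF n fuel F) := by
  intro fuel
  induction fuel with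
  | zero => intro d F hrel; exact hrel
  | succ fuel ih =>
    intro d F hrel
    show pvRel n (if pvAreFieldsUnique d then d else pvWhileA fuel (pvPassA d))
      (if pvUniqueF n F then F else pvWhileF n fuel (pvPassF n F))
    rw [pvRel_unique n d F hrel]
    by_cases hu : pvUniqueF n F = true
    · rw [if_pos hu, if_pos hu]; exact hrel
    · rw [if_neg hu, if_neg hu]
      exact ih _ _ (pvRel_pass n d F hrel)

lemma pvRel_wl (n : Int) : ∀ (fuel : Nat) (d : PySem.Dict Int (List String))
    (F : Int → List String) (queue : List Int), pvRel n d F →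
    (∀ p ∈ queue, p ∈ PySem.List.pyRange 0 n) →
    pvRel n (pvWorklist fuel n d queue) (pvWlF n fuel F queue) := by
  intro fuel
  induction fuel with
  | zero => intro d F queue hrel _; exact hrel
  | succ fuel ih =>
    intro d F queue hrel hsub
    match queue with
    | [] => exact hrel
    | q :: rest =>
      have hq := hsub q List.mem_cons_self
      have hf : (d.getD q []).getD 0 "" = (F q).getD 0 "" := by rw [hrel.2 q hq]
      have hfold := pv_foldl_rel
        (fun (st : PySem.Dict Int (List String) × List Int)
             (ct : (Int → List String) × List Int) =>
          pvRel n st.1 ct.1 ∧ st.2 = ct.2 ∧ ∀ p ∈ ct.2, p ∈ PySem.List.pyRange 0 n)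
        (fun st r =>
          if (st.1.getD r []).length > 1 ∧ ((d.getD q []).getD 0 "") ∈ st.1.getD r [] then
            let fields' := st.1.modify r [] (fun l =>
              (PySem.List.remove? l ((d.getD q []).getD 0 "")).getD l)
            if (fields'.getD r []).length = 1 then (fields', st.2 ++ [r]) else (fields', st.2)
          else st)
        (pvWlStep ((F q).getD 0 ""))
        (PySem.List.pyRange 0 n)
        (fun st ct r hr hst => by
          obtain ⟨hrel', hqeq, hsub'⟩ := hst
          dsimp only
          rw [hf, hrel'.2 r hr]
          unfold pvWlStep
          by_cases hg : (ct.1 r).length > 1 ∧ ((F q).getD 0 "") ∈ ct.1 r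
          · rw [if_pos hg, if_pos hg,
              show (fun l => (PySem.List.remove? l ((F q).getD 0 "")).getD l)
                  = fun l : List String => l.erase ((F q).getD 0 "") from
                funext (fun l => pv_removeD_eq_erase)]
            have hmod := pvRel_modify n st.1 ct.1 hrel' r hr
              (fun l => l.erase ((F q).getD 0 ""))
            have hgd : (st.1.modify r []
                (fun l : List String => l.erase ((F q).getD 0 ""))).getD r []
                = (ct.1 r).erase ((F q).getD 0 "") := by
              rw [hmod.2 r hr]
              simp [updF]
            have hupd : (updF ct.1 r ((ct.1 r).erase ((F q).getD 0 ""))) r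
                = (ct.1 r).erase ((F q).getD 0 "") := by simp [updF]
            rw [hgd, hupd]
            by_cases hc : ((ct.1 r).erase ((F q).getD 0 "")).length = 1
            · rw [if_pos hc, if_pos hc]
              exact ⟨hmod, by rw [hqeq], by
                intro p hp
                rcases List.mem_append.mp hp with hp | hp
                · exact hsub' p hp
                · rw [List.mem_singleton.mp hp]; exact hr⟩
            · rw [if_neg hc, if_neg hc]
              exact ⟨hmod, hqeq, hsub'⟩
          · rw [if_neg hg, if_neg hg]
            exact ⟨hrel', hqeq, hsub'⟩)
        (d, rest) (F, rest)
        ⟨hrel, rfl, fun p hp => hsub p (List.mem_cons_of_mem q hp)⟩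
      show pvRel n
        (pvWorklist fuel n
          ((PySem.List.pyRange 0 n).foldl
            (fun st r =>
              if (st.1.getD r []).length > 1 ∧ ((d.getD q []).getD 0 "") ∈ st.1.getD r [] then
                let fields' := st.1.modify r [] (fun l =>
                  (PySem.List.remove? l ((d.getD q []).getD 0 "")).getD l)
                if (fields'.getD r []).length = 1 then (fields', st.2 ++ [r]) else (fields', st.2)
              else st) (d, rest)).1
          ((PySem.List.pyRange 0 n).foldl
            (fun st r =>
              if (st.1.getD r []).length > 1 ∧ ((d.getD q []).getD 0 "") ∈ st.1.getD r [] then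
                let fields' := st.1.modify r [] (fun l =>
                  (PySem.List.remove? l ((d.getD q []).getD 0 "")).getD l)
                if (fields'.getD r []).length = 1 then (fields', st.2 ++ [r]) else (fields', st.2)
              else st) (d, rest)).2)
        (pvWlF n fuel
          ((PySem.List.pyRange 0 n).foldl (pvWlStep ((F q).getD 0 "")) (F, rest)).1
          ((PySem.List.pyRange 0 n).foldl (pvWlStep ((F q).getD 0 "")) (F, rest)).2)
      rw [hfold.2.1]
      exact ih _ _ _ hfold.1 hfold.2.2

-- ---------- final assembly ----------
lemma pv_main (tickets : List String) (valid_values : List (String × List Int))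
    (hparse : ∀ p ∈ PySem.List.pyRange 0 (PySem.Dict.size (PySem.Dict.ofList valid_values) : Nat),
      ∀ t ∈ tickets, (pvColVal t p).isSome)
    (l : List Int)
    (hlmem : l ∈ (PySem.List.pyRange 0 (PySem.Dict.size (PySem.Dict.ofList valid_values) : Nat)).permutations)
    (hca : cascadeOk (pvCand tickets (PySem.Dict.ofList valid_values)) l [] = true) :
    find_fields_order tickets valid_values = find_fields_order_alt tickets valid_values := by
  set vv := PySem.Dict.ofList valid_values with hvv
  set n : Int := ((vv.size : Nat) : Int) with hn
  set cand : Int → List String := pvCand tickets vv with hcand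
  have hl : l.Perm (PySem.List.pyRange 0 n) := List.mem_permutations.mp hlmem
  have hrngnd : (PySem.List.pyRange 0 n).Nodup := PySem.List.nodup_pyRange_one 0 n
  have hkeysnd : vv.keys.Nodup := PySem.Dict.nodup_keys_ofList valid_values
  -- phase 1, A side
  have hAit : (pvFieldsA tickets vv).items
      = (PySem.List.pyRange 0 n).map (fun p => (p, pvCandA tickets vv p)) :=
    pvA_items tickets vv
  have hcandA : ∀ p ∈ PySem.List.pyRange 0 n, pvCandA tickets vv p = cand p :=
    fun p hp => pv_candA_eq tickets vv p (hparse p hp)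
  have hrelA : pvRel n (pvFieldsA tickets vv) cand := by
    constructor
    · simp [PySem.Dict.keys, hAit, Function.comp_def]
    · intro p hp
      rw [pv_getD_of_items_map hAit hrngnd hp, hcandA p hp]
  have hfuelA : ((pvFieldsA tickets vv).values.map List.length).sum = sumLen n cand := by
    have hv : (pvFieldsA tickets vv).values.map List.length
        = (PySem.List.pyRange 0 n).map (fun p => (cand p).length) := by
      simp only [PySem.Dict.values, hAit, List.map_map]
      exact List.map_congr_left (fun p hp => by simp [Function.comp, hcandA p hp])
    rw [hv]; rfl
  -- phase 1, B side
  have hBit : (pvFieldsB tickets vv).items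
      = (PySem.List.pyRange 0 n).map (fun p => (p, pvCandB tickets vv p)) :=
    pvB_items (fun p => pvCandB tickets vv p) n
  have hcandB : ∀ p ∈ PySem.List.pyRange 0 n, pvCandB tickets vv p = cand p :=
    fun p hp => pv_candB_eq tickets vv hkeysnd p hp (hparse p hp)
  have hrelB : pvRel n (pvFieldsB tickets vv) cand := by
    constructor
    · simp [PySem.Dict.keys, hBit, Function.comp_def]
    · intro p hp
      rw [pv_getD_of_items_map hBit hrngnd hp, hcandB p hp]
  have hqueue : (PySem.List.pyRange 0 n).filter
        (fun p => decide (((pvFieldsB tickets vv).getD p []).length = 1))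
      = (PySem.List.pyRange 0 n).filter (fun p => decide ((cand p).length = 1)) := by
    apply List.filter_congr
    intro p hp
    rw [pv_getD_of_items_map hBit hrngnd hp, hcandB p hp]
  -- the shared invariant at the initial state
  have hinv0 : pvInv n cand (elimAssign cand l []) cand := by
    constructor
    · exact fun pf hpf => (elim_mem cand l [] hca pf hpf).1
    · intro p hp
      exact ⟨fun g hg => hg, by rw [hcand]; unfold pvCand; exact hkeysnd.filter _⟩
  -- the two elimination phases agree position by position
  have hpoint : ∀ p ∈ PySem.List.pyRange 0 n,
      pvWhileF n (((pvFieldsA tickets vv).values.map List.length).sum + 1) cand p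
        = pvWlF n (n.toNat + 1) cand
            ((PySem.List.pyRange 0 n).filter (fun p => decide ((cand p).length = 1))) p := by
    intro p hp
    obtain ⟨pf, hpf, hfst⟩ := elim_cover cand l (hl.mem_iff.mpr hp)
    have hA := pvWhile_reaches n cand l hl hca
      (((pvFieldsA tickets vv).values.map List.length).sum + 1) cand hinv0
      (by rw [hfuelA]; omega) pf hpf
    have hrlen : (PySem.List.pyRange 0 n).length = vv.size := by
      rw [hn]
      simp [pysem]
    have hB := pvWl_reaches n cand l hl hca (n.toNat + 1) cand
      ((PySem.List.pyRange 0 n).filter (fun p => decide ((cand p).length = 1))) hinv0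
      (fun p hp => by
        have h := List.mem_filter.mp hp
        exact ⟨h.1, of_decide_eq_true h.2⟩)
      (fun p hp h1 => Or.inl (List.mem_filter.mpr ⟨hp, decide_eq_true h1⟩))
      (by
        have hdisj := pv_filter_disjoint_length (PySem.List.pyRange 0 n)
          (fun p => decide ((cand p).length = 1)) (fun p => decide (1 < (cand p).length))
          (fun x => by
            rintro ⟨h1, h2⟩
            have h1 := of_decide_eq_true h1
            have h2 := of_decide_eq_true h2
            omega)
        have hton : n.toNat = vv.size := by rw [hn]; simp
        unfold nbig
        omega)
      pf hpf
    rw [← hfst, hA, hB]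
  -- assemble the returned items lists
  show (pvWhileA (((pvFieldsA tickets vv).values.map List.length).sum + 1) (pvFieldsA tickets vv)).items
      = (pvWorklist (n.toNat + 1) n (pvFieldsB tickets vv)
          ((PySem.List.pyRange 0 n).filter
            (fun p => decide (((pvFieldsB tickets vv).getD p []).length = 1)))).items
  have hrelA' := pvRel_while n (((pvFieldsA tickets vv).values.map List.length).sum + 1)
    (pvFieldsA tickets vv) cand hrelA
  rw [hqueue] at *
  have hrelB' := pvRel_wl n (n.toNat + 1) (pvFieldsB tickets vv) cand
    ((PySem.List.pyRange 0 n).filter (fun p => decide ((cand p).length = 1))) hrelB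
    (fun p hp => List.mem_of_mem_filter hp)
  rw [PySem.Dict.items_eq_map_keys _ (by rw [hrelA'.1]; exact hrngnd) [],
    PySem.Dict.items_eq_map_keys _ (by rw [hrelB'.1]; exact hrngnd) [],
    hrelA'.1, hrelB'.1]
  apply List.map_congr_left
  intro p hp
  rw [hrelA'.2 p hp, hrelB'.2 p hp, hpoint p hp]

-- ===== VERDICT (by name: the statement is the Claim_ definition above) =====
theorem find_fields_order_spec : Claim_equal_find_fields_order := by
  intro tickets valid_values _hdom hpre
  obtain ⟨hparse, l, hlmem, hca⟩ := hpre
  exact pv_main tickets valid_values hparse l hlmem hca
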